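-- pv_equiv track=rewrite | github.com/steveAzo/A2SV | 11-Apr-2025/Largest Local Values in a Matrix 332414.py | largestLocal
-- ===== SOURCE A (Python) =====
-- def largestLocal(grid):
--     result = []
--
--     n = len(grid)
--     m = len(grid[0])
--     for i in range(1, n-1):
--         res = []
--         for j in range(1, n-1):
--             res.append(max(grid[i][j], grid[i-1][j-1], grid[i-1][j]
--                        ,grid[i-1][j+1], grid[i][j-1], grid[i][j+1]
--                        ,grid[i+1][j-1], grid[i+1][j], grid[i+1][j+1]
--                     ))
--         result.append(res)
--
--     return result
-- ===== SOURCE B (Python) =====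
-- def largestLocal(grid):
--     n = len(grid)
--     # separable two-pass: horizontal 3-max per row, then vertical 3-max per column
--     H = [[max(row[j - 1], row[j], row[j + 1]) for j in range(1, n - 1)] for row in grid]
--     return [[max(H[i - 1][j], H[i][j], H[i + 1][j]) for j in range(len(H[i]))]
--             for i in range(1, n - 1)]
-- ===== Notes on version B (the rewrite author's own statement) =====
-- stated objective: alternative
-- what changed: Replaces the single 9-way window max with a separable two-pass filter: a horizontal 3-max per row builds an intermediate grid H, then a vertical 3-max over H produces each output entry (6 comparisons per cell instead of 8).
import Mathlib
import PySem

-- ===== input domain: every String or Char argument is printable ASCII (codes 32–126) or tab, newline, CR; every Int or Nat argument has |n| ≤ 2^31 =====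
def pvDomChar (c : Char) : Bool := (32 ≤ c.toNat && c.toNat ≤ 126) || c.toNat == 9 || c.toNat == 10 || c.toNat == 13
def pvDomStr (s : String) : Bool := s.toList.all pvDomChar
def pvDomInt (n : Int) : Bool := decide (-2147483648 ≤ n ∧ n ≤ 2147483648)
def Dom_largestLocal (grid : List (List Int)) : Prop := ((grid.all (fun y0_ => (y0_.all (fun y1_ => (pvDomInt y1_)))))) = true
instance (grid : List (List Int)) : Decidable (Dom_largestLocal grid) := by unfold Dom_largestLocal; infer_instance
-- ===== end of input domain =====

-- B replaces the single-pass 9-way window max with a separable two-pass 3-max filter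
-- (alternative decomposition, same asymptotic cost); return values agree wherever A returns.

-- ===== PORT A =====
-- A's 'm = len(grid[0])' is unused except that it raises IndexError on the empty grid,
-- which Pre_ excludes; out-of-range pyGetD defaults are likewise reached only outside Pre_.
def largestLocal (grid : List (List Int)) : List (List Int) :=
  (PySem.List.pyRange 1 ((grid.length : Int) - 1) 1).foldl (fun result i =>
    result ++ [(PySem.List.pyRange 1 ((grid.length : Int) - 1) 1).foldl (fun res j =>
        res ++ [max (max (max (max (max (max (max (max
          (PySem.List.pyGetD (PySem.List.pyGetD grid i []) j 0)
          (PySem.List.pyGetD (PySem.List.pyGetD grid (i-1) []) (j-1) 0))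
          (PySem.List.pyGetD (PySem.List.pyGetD grid (i-1) []) j 0))
          (PySem.List.pyGetD (PySem.List.pyGetD grid (i-1) []) (j+1) 0))
          (PySem.List.pyGetD (PySem.List.pyGetD grid i []) (j-1) 0))
          (PySem.List.pyGetD (PySem.List.pyGetD grid i []) (j+1) 0))
          (PySem.List.pyGetD (PySem.List.pyGetD grid (i+1) []) (j-1) 0))
          (PySem.List.pyGetD (PySem.List.pyGetD grid (i+1) []) j 0))
          (PySem.List.pyGetD (PySem.List.pyGetD grid (i+1) []) (j+1) 0)]) []]) []

-- ===== PORT B =====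
-- the intermediate grid H of Source B: horizontal 3-max of each row
def altH (grid : List (List Int)) : List (List Int) :=
  grid.map (fun row =>
    (PySem.List.pyRange 1 ((grid.length : Int) - 1) 1).map (fun j =>
      max (max (PySem.List.pyGetD row (j-1) 0) (PySem.List.pyGetD row j 0))
          (PySem.List.pyGetD row (j+1) 0)))

def largestLocal_alt (grid : List (List Int)) : List (List Int) :=
  (PySem.List.pyRange 1 ((grid.length : Int) - 1) 1).map (fun i =>
    (PySem.List.pyRange 0 ((PySem.List.pyGetD (altH grid) i []).length : Int) 1).map (fun j =>
      max (max (PySem.List.pyGetD (PySem.List.pyGetD (altH grid) (i-1) []) j 0)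
               (PySem.List.pyGetD (PySem.List.pyGetD (altH grid) i []) j 0))
          (PySem.List.pyGetD (PySem.List.pyGetD (altH grid) (i+1) []) j 0)))

-- ===== PRECONDITION & SPEC =====
-- Pre_ excludes exactly the inputs on which A raises IndexError: the empty grid
-- (len(grid[0])), and grids with ≥ 3 rows where some row is shorter than the number
-- of rows (A reads every row up to column len(grid)-1).
def Pre_largestLocal (grid : List (List Int)) : Prop :=
  grid ≠ [] ∧ (3 ≤ grid.length → ∀ row ∈ grid, grid.length ≤ row.length)
instance (grid : List (List Int)) : Decidable (Pre_largestLocal grid) := by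
  unfold Pre_largestLocal; infer_instance

def pvWitness_largestLocal : List (List Int) :=
  [[1, 2, 3], [4, 9, 6], [7, 8, 5]]

def Spec_largestLocal (grid : List (List Int)) (out : List (List Int)) : Prop :=
  out = largestLocal_alt grid
instance (grid : List (List Int)) (out : List (List Int)) : Decidable (Spec_largestLocal grid out) := by
  unfold Spec_largestLocal; infer_instance

-- ===== CLAIM (what is proved, stated in full; the proofs are below) =====
def Claim_equal_largestLocal : Prop :=
  ∀ (grid : List (List Int)), Dom_largestLocal grid → Pre_largestLocal grid →
    Spec_largestLocal grid (largestLocal grid)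

-- ===== LEMMAS AND PROOFS =====

-- The core equality. Both ports only read cells via getD with a default, so the maps
-- agree pointwise; the hypotheses of Pre_ are not even needed for the ports' equality
-- (they matter only for faithfulness to the Pythons, which raise outside Pre_).
theorem largestLocal_eq_alt (grid : List (List Int)) :
    largestLocal grid = largestLocal_alt grid := by
  by_cases h3 : 3 ≤ grid.length
  · have hrange : PySem.List.pyRange 1 ((grid.length : Int) - 1) 1
        = (List.range (grid.length - 2)).map (fun k => ((k + 1 : Nat) : Int)) := by
      rw [PySem.List.pyRange_one]
      have ht : ((grid.length : Int) - 1 - 1).toNat = grid.length - 2 := by omega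
      rw [ht]
      refine List.map_congr_left fun k _ => by push_cast; ring
    have e1 : ∀ k : Nat, ((k + 1 : Nat) : Int) - 1 = (k : Int) := by
      intro k; push_cast; ring
    have e2 : ∀ k : Nat, ((k + 1 : Nat) : Int) + 1 = ((k + 2 : Nat) : Int) := by
      intro k; push_cast; ring
    have hH : ∀ r : Nat, r < grid.length →
        (altH grid).getD r []
        = (PySem.List.pyRange 1 ((grid.length : Int) - 1) 1).map (fun j =>
            max (max (PySem.List.pyGetD (grid.getD r []) (j-1) 0)
                     (PySem.List.pyGetD (grid.getD r []) j 0))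
                (PySem.List.pyGetD (grid.getD r []) (j+1) 0)) := by
      intro r hr
      rw [altH, List.getD_eq_getElem _ _ (by simpa using hr), List.getElem_map,
          List.getD_eq_getElem _ _ hr]
    simp only [largestLocal, largestLocal_alt,
      PySem.List.foldl_append_singleton_eq_map, List.nil_append, hrange,
      List.map_map, Function.comp_def]
    refine List.map_congr_left fun a ha => ?_
    have han : a < grid.length - 2 := List.mem_range.mp ha
    simp only [e1, e2, PySem.List.pyGetD_natCast, hH a (by omega), hH (a+1) (by omega),
      hH (a+2) (by omega), List.length_map, PySem.List.length_pyRange_one]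
    have ht2 : (((grid.length : Int) - 1 - 1).toNat) = grid.length - 2 := by omega
    rw [ht2, PySem.List.pyRange_zero_nat]
    simp only [List.map_map, Function.comp_def]
    refine List.map_congr_left fun b hb => ?_
    have hbn : b < grid.length - 2 := List.mem_range.mp hb
    rw [PySem.List.pyGetD_map_pyRange_one _ 1 _ b 0 (by omega),
        PySem.List.pyGetD_map_pyRange_one _ 1 _ b 0 (by omega),
        PySem.List.pyGetD_map_pyRange_one _ 1 _ b 0 (by omega)]
    have e5 : (1 + (b : Int)) = ((b + 1 : Nat) : Int) := by push_cast; ring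
    simp only [e5, e1, e2, PySem.List.pyGetD_natCast]
    ac_rfl
  · have hnil : PySem.List.pyRange 1 ((grid.length : Int) - 1) 1 = [] :=
      PySem.List.pyRange_one_eq_nil (by omega)
    simp [largestLocal, largestLocal_alt, hnil]

-- ===== VERDICT (by name: the statement is the Claim_ definition above) =====
theorem largestLocal_spec : Claim_equal_largestLocal :=
  fun grid _ _ => largestLocal_eq_alt grid
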